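-- pv_equiv track=rewrite | github.com/Nick-prog/QnE-Python | core/process.py | process_str
-- ===== SOURCE A (Python) =====
-- def process_str(_str: str) -> list:
--
--     result = []
--
--     last_idx = 1
--
--     for idx in range(len(_str)):
--         if idx == 0:
--             result.append(_str[idx])
--         elif _str[idx] == " " or _str[idx] == "\\":
--             result.append(_str[last_idx:idx])
--             last_idx = idx + 1
--
--     return [x for x in result if x]
-- ===== SOURCE B (Python) =====
-- def process_str(_str: str) -> list:
--     if not _str:
--         return []
--     pieces = _str[1:].replace("\\", " ").split(" ")
--     return [x for x in [_str[0]] + pieces[:-1] if x]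
-- ===== Notes on version B (the rewrite author's own statement) =====
-- stated objective: idiomatic
-- what changed: B replaces the index loop with last_idx bookkeeping and per-delimiter slicing by one whole-string split (normalise backslash to space, str.split), then reshapes: prepend the first character, drop the trailing piece, filter empties; the split runs in C instead of a per-character Python loop.
import Mathlib
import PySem

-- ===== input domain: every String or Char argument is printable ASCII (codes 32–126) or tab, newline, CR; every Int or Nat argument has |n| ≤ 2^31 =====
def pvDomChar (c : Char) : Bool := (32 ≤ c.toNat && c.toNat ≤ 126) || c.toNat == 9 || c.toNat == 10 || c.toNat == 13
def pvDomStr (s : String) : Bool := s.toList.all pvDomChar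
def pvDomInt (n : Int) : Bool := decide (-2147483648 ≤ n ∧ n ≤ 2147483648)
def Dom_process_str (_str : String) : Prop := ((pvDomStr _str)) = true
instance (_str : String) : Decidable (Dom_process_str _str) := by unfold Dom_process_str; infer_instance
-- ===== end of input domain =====

-- B replaces A's index loop (last_idx bookkeeping, per-delimiter slicing) by one whole-string
-- split — normalise '\' to ' ', str.split(" "), drop the trailing piece, prepend the head,
-- filter empties; objective: idiomatic.


-- ===== PORT A =====
-- literal transliteration of A: result/last_idx state folded over range(len(_str));
-- strings are carried as List Char, converted to String after the final truthiness filter.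
def process_str (_str : String) : List String :=
  let cs := _str.toList
  let st :=
    (PySem.List.pyRange 0 (cs.length : Int) 1).foldl
      (fun (st : List (List Char) × Int) (idx : Int) =>
        if idx = 0 then
          (st.1 ++ [[PySem.List.pyGetD cs idx ' ']], st.2)
        else if PySem.List.pyGetD cs idx ' ' = ' ' ∨ PySem.List.pyGetD cs idx ' ' = '\\' then
          (st.1 ++ [PySem.List.slice cs (some st.2) (some idx)], idx + 1)
        else st)
      (([] : List (List Char)), (1 : Int))
  (st.1.filter (fun x => x ≠ [])).map (fun x => String.ofList x)

-- ===== PORT B =====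
-- literal transliteration of B (Source B): guard on empty, replace+split on the tail,
-- drop the trailing piece ([:-1]), prepend the head, filter empties.
def process_str_alt (_str : String) : List String :=
  match _str.toList with
  | [] => []
  | c :: tail =>
      let pieces := PySem.Chars.splitOn (PySem.Chars.replace tail ['\\'] [' ']) [' ']
      ((([c] :: PySem.List.slice pieces none (some (-1))).filter (fun x => x ≠ [])).map
        (fun x => String.ofList x))

-- ===== PRECONDITION & SPEC =====
def Spec_process_str (_str : String) (out : List String) : Prop := out = process_str_alt _str
instance (_str : String) (out : List String) : Decidable (Spec_process_str _str out) := by unfold Spec_process_str; infer_instance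

-- ===== CLAIM (what is proved, stated in full; the proofs are below) =====
def Claim_equal_process_str : Prop := ∀ (_str : String), Dom_process_str _str → Spec_process_str _str (process_str _str)

-- ===== LEMMAS AND PROOFS =====

-- all pieces of l split at characters satisfying p (keeping empties); cur = segment built so far
def pvAllP (p : Char → Bool) (cur : List Char) : List Char → List (List Char)
  | [] => [cur]
  | c :: rest => if p c then cur :: pvAllP p [] rest else pvAllP p (cur ++ [c]) rest

def pvDelim (c : Char) : Bool := c = ' ' || c = '\\'

-- the segments A's loop appends after index 0: all pieces except the trailing one
def pvSegs (cur : List Char) : List Char → List (List Char)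
  | [] => []
  | c :: rest => if pvDelim c then cur :: pvSegs [] rest else pvSegs (cur ++ [c]) rest

def pvSub (c : Char) : Char := if c = '\\' then ' ' else c

theorem pvAllP_ne_nil (p : Char → Bool) (cur l) : pvAllP p cur l ≠ [] := by
  induction l generalizing cur with
  | nil => simp [pvAllP]
  | cons c rest ih => simp only [pvAllP]; split <;> simp [ih]

theorem pvSegs_eq_dropLast (cur l) : pvSegs cur l = (pvAllP pvDelim cur l).dropLast := by
  induction l generalizing cur with
  | nil => simp [pvSegs, pvAllP]
  | cons c rest ih =>
      simp only [pvSegs, pvAllP]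
      split
      · rw [List.dropLast_cons_of_ne_nil (pvAllP_ne_nil _ _ _), ih]
      · exact ih _

theorem pvAllP_map_sub (cur l) :
    pvAllP (fun c => c = ' ') cur (l.map pvSub) = pvAllP pvDelim cur l := by
  induction l generalizing cur with
  | nil => simp [pvAllP]
  | cons c rest ih =>
      by_cases h : c = '\\'
      · subst h; simp [pvAllP, pvSub, pvDelim, ih]
      · by_cases h2 : c = ' '
        · subst h2; simp [pvAllP, pvSub, pvDelim, ih]
        · simp [pvAllP, pvSub, pvDelim, h, h2, ih]

theorem pvReplace_go (fuel : Nat) (l acc : List Char) (h : l.length ≤ fuel) :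
    PySem.Chars.replace.go ['\\'] [' '] fuel l acc = acc.reverse ++ l.map pvSub := by
  induction fuel generalizing l acc with
  | zero => cases l <;> simp_all [PySem.Chars.replace.go]
  | succ n ih =>
      cases l with
      | nil => simp [PySem.Chars.replace.go]
      | cons c t =>
          simp only [PySem.Chars.replace.go]
          by_cases h1 : c = '\\'
          · subst h1
            simp only [List.isPrefixOf, BEq.rfl, Bool.true_and, if_true]
            rw [show List.drop (['\\'] : List Char).length ('\\' :: t) = t from rfl,
                show ([' '] : List Char).reverse ++ acc = ' ' :: acc from rfl,
                ih t (' ' :: acc) (by simpa using h)]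
            simp [pvSub]
          · have hp : List.isPrefixOf ['\\'] (c :: t) = false := by
              simp [List.isPrefixOf]; exact fun hh => h1 hh.symm
            rw [hp]
            simp only [Bool.false_eq_true, if_false]
            rw [ih t (c :: acc) (by simpa using h)]
            simp [pvSub, h1]

theorem pvReplace_eq (l : List Char) :
    PySem.Chars.replace l ['\\'] [' '] = l.map pvSub := by
  simp [PySem.Chars.replace, pvReplace_go l.length l [] (le_refl _)]

theorem pvSplitOn_go (fuel : Nat) (l cur : List Char) (acc : List (List Char))
    (h : l.length < fuel) :
    PySem.Chars.splitOn.go [' '] fuel l cur acc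
      = acc.reverse ++ pvAllP (fun c => c = ' ') cur.reverse l := by
  induction fuel generalizing l cur acc with
  | zero => omega
  | succ n ih =>
      cases l with
      | nil => simp [PySem.Chars.splitOn.go, pvAllP]
      | cons c t =>
          simp only [PySem.Chars.splitOn.go]
          by_cases h1 : c = ' '
          · subst h1
            simp only [List.isPrefixOf, BEq.rfl, Bool.true_and, if_true]
            rw [show List.drop ([' '] : List Char).length (' ' :: t) = t from rfl,
                ih t [] (cur.reverse :: acc) (by simpa using h)]
            simp [pvAllP]
          · have hp : List.isPrefixOf [' '] (c :: t) = false := by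
              simp [List.isPrefixOf]; exact fun hh => h1 hh.symm
            rw [hp]
            simp only [Bool.false_eq_true, if_false]
            rw [ih t (c :: cur) acc (by simpa using h)]
            simp [pvAllP, h1]

theorem pvSplit_eq (l : List Char) :
    PySem.Chars.splitOn l [' '] = pvAllP (fun c => c = ' ') [] l := by
  rw [PySem.Chars.splitOn, pvSplitOn_go _ _ _ _ (Nat.lt_succ_self _)]
  simp

-- A's loop invariant: starting at index pre.length + cur.length with last_idx = pre.length,
-- the loop appends exactly the non-trailing segments of rest continued from cur.
theorem pvLoopInv (rest : List Char) : ∀ (pre cur : List Char) (acc : List (List Char)), pre ≠ [] →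
    ((PySem.List.pyRange ((pre.length + cur.length : Nat) : Int)
        (((pre ++ cur ++ rest).length : Nat) : Int) 1).foldl
      (fun (st : List (List Char) × Int) (idx : Int) =>
        if idx = 0 then
          (st.1 ++ [[PySem.List.pyGetD (pre ++ cur ++ rest) idx ' ']], st.2)
        else if PySem.List.pyGetD (pre ++ cur ++ rest) idx ' ' = ' ' ∨
                PySem.List.pyGetD (pre ++ cur ++ rest) idx ' ' = '\\' then
          (st.1 ++ [PySem.List.slice (pre ++ cur ++ rest) (some st.2) (some idx)], idx + 1)
        else st)
      (acc, ((pre.length : Nat) : Int))).fst = acc ++ pvSegs cur rest := by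
  induction rest with
  | nil =>
      intro pre cur acc hpre
      rw [show ((pre ++ cur ++ ([] : List Char)).length : Int) = ((pre.length + cur.length : Nat) : Int) by
        simp]
      simp [PySem.List.pyRange, pvSegs]
  | cons r rest ih =>
      intro pre cur acc hpre
      have hk : ((pre.length + cur.length : Nat) : Int) < ((pre ++ cur ++ (r :: rest)).length : Int) := by
        simp
      rw [PySem.List.pyRange_one_cons hk]
      have hk0 : ((pre.length + cur.length : Nat) : Int) ≠ 0 := by
        have : pre.length ≠ 0 := by simpa [List.length_eq_zero_iff] using hpre
        omega
      have hget : PySem.List.pyGetD (pre ++ cur ++ (r :: rest)) ((pre.length + cur.length : Nat) : Int) ' ' = r := by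
        rw [PySem.List.pyGetD_natCast]
        rw [show pre ++ cur ++ (r :: rest) = (pre ++ cur) ++ (r :: rest) by simp]
        simp [List.getD_eq_getElem?_getD]
      simp only [List.foldl_cons, if_neg hk0, hget]
      by_cases hd : r = ' ' ∨ r = '\\'
      · rw [if_pos hd]
        have hslice : PySem.List.slice (pre ++ cur ++ (r :: rest)) (some ((pre.length : Nat) : Int))
            (some ((pre.length + cur.length : Nat) : Int)) = cur := by
          rw [PySem.List.slice_natCast]
          rw [show pre ++ cur ++ (r :: rest) = pre ++ (cur ++ (r :: rest)) by simp]
          rw [List.drop_append_of_le_length (le_refl _)]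
          simp
        rw [hslice]
        have := ih (pre ++ cur ++ [r]) [] (acc ++ [cur]) (by simp)
        simp only [List.append_nil, List.length_append, List.length_cons, List.length_nil] at this ⊢
        rw [show ((pre.length + cur.length : Nat) : Int) + 1 = ((pre.length + cur.length + 1 : Nat) : Int) by push_cast; ring] at *
        rw [show (pre ++ cur ++ [r]) ++ rest = pre ++ cur ++ (r :: rest) by simp] at this
        rw [show pre.length + cur.length + 1 + 0 = pre.length + cur.length + 1 by omega] at this
        rw [show pre.length + cur.length + 1 + rest.length = pre.length + cur.length + (rest.length + 1) by omega] at this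
        rw [this]
        simp [pvSegs, hd, pvDelim]
      · rw [if_neg hd]
        have := ih pre (cur ++ [r]) acc hpre
        rw [show (pre ++ (cur ++ [r])) ++ rest = pre ++ cur ++ (r :: rest) by simp] at this
        rw [show ((pre.length + (cur ++ [r]).length : Nat) : Int) = ((pre.length + cur.length : Nat) : Int) + 1 by push_cast; simp; ring] at this
        rw [this]
        have hnd : pvDelim r = false := by
          simp [pvDelim]; constructor
          · exact fun hh => hd (Or.inl hh)
          · exact fun hh => hd (Or.inr hh)
        simp [pvSegs, hnd]

-- ===== VERDICT (by name: the statement is the Claim_ definition above) =====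
theorem process_str_spec : Claim_equal_process_str := by
  intro s _
  unfold Spec_process_str process_str process_str_alt
  cases h : s.toList with
  | nil => simp [PySem.List.pyRange]
  | cons c t =>
      simp only [h]
      rw [pvReplace_eq, pvSplit_eq, pvAllP_map_sub, PySem.List.slice_to_neg_one,
          ← pvSegs_eq_dropLast]
      have h0 : (0 : Int) < (((c :: t).length : Nat) : Int) := by simp
      rw [PySem.List.pyRange_one_cons h0]
      simp only [List.foldl_cons, if_true, PySem.List.pyGetD_zero_cons, List.nil_append]
      have := pvLoopInv t [c] [] [[c]] (by simp)
      simp only [List.length_cons, List.length_nil, List.append_nil,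
        List.singleton_append] at this ⊢
      rw [show (1 + 0 : Nat) = 1 by omega] at this
      norm_num at this ⊢
      rw [this]
      simp
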